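-- pv_equiv track=rewrite | github.com/FredHutch/microbial-rnaseq | convert_ncbi_genome_list.py | reformat_name
-- ===== SOURCE A (Python) =====
-- def reformat_name(s, chars=[",", ".", "=", "-", "(", ")", "'", "^", '"', "[", "]"]):
--     s = s.strip(" ")
--     for c in chars:
--         s = s.replace(c, "")
--
--     while "  " in s:
--         s = s.replace("  ", " ")
--     s = s.replace(" ", "_")
--     return s
-- ===== SOURCE B (Python) =====
-- def reformat_name(s, chars=[",", ".", "=", "-", "(", ")", "'", "^", '"', "[", "]"]):
--     t = s.strip(" ")
--     for c in chars:
--         t = t.replace(c, "")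
--     out = []
--     pending = False
--     for ch in t:
--         if ch == " ":
--             pending = True
--         elif pending:
--             out.append("_")
--             out.append(ch)
--             pending = False
--         else:
--             out.append(ch)
--     if pending:
--         out.append("_")
--     return "".join(out)
-- ===== Notes on version B (the rewrite author's own statement) =====
-- stated objective: alternative
-- what changed: A collapses space runs by repeatedly replacing double spaces in a while loop over the whole string and then substitutes underscores in a final pass; B makes a single character scan with a pending-space flag that emits one underscore per run of spaces; the order-sensitive sequential removal of the chars substrings is kept.
import Mathlib
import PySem

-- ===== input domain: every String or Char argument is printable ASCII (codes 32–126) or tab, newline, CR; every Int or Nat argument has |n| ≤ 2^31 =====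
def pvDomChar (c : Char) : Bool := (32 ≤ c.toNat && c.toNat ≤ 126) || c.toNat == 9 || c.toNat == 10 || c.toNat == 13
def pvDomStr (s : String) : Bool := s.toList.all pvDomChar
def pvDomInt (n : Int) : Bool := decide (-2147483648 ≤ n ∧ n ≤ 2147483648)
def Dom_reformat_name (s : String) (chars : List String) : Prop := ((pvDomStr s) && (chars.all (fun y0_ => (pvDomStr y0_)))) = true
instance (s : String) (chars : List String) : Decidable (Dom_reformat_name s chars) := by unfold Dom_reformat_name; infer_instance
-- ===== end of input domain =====

-- B replaces A's repeated whole-string passes (the `while "  " in s` collapse loop plus a final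
-- replace) by a single character scan with a pending-space flag; same return value, no side effects.

-- ===== PORT A =====
-- helper lemmas needed only for the TERMINATION of A's `while "  " in s` loop
def pvRep2 : List Char → List Char
  | [] => []
  | [c] => [c]
  | a :: b :: t => if a = ' ' ∧ b = ' ' then ' ' :: pvRep2 t else a :: pvRep2 (b :: t)

theorem pvGo2 : ∀ (fuel : Nat) (l acc : List Char), l.length ≤ fuel →
    PySem.Chars.replace.go [' ', ' '] [' '] fuel l acc = acc.reverse ++ pvRep2 l := by
  intro fuel
  induction fuel with
  | zero =>
    intro l acc h
    have : l = [] := List.length_eq_zero_iff.mp (Nat.le_zero.mp h)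
    subst this
    simp [PySem.Chars.replace.go, pvRep2]
  | succ n ih =>
    intro l acc h
    match l with
    | [] => simp [PySem.Chars.replace.go, pvRep2]
    | [c] =>
      have hpre : [' ', ' '].isPrefixOf [c] = false := by
        simp [List.isPrefixOf]
      simp [PySem.Chars.replace.go, hpre, ih [] (c :: acc) (by simp), pvRep2]
    | a :: b :: t =>
      by_cases hab : a = ' ' ∧ b = ' '
      · obtain ⟨ha, hb⟩ := hab
        subst ha; subst hb
        have hlen : t.length ≤ n := by simp at h; omega
        simp [PySem.Chars.replace.go, List.isPrefixOf, ih t (' ' :: acc) hlen, pvRep2]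
      · have hlen : (b :: t).length ≤ n := by simp at h ⊢; omega
        have hne : ¬(' ' = a ∧ ' ' = b) := fun hx => hab ⟨hx.1.symm, hx.2.symm⟩
        have hpre : [' ', ' '].isPrefixOf (a :: b :: t) = false := by
          simp [List.isPrefixOf]; tauto
        simp [PySem.Chars.replace.go, hpre, ih (b :: t) (a :: acc) hlen, pvRep2, hab]

theorem pvReplace_dbl (l : List Char) :
    PySem.Chars.replace l [' ', ' '] [' '] = pvRep2 l := by
  have := pvGo2 l.length l [] le_rfl
  simpa [PySem.Chars.replace] using this

theorem pvRep2_len_le (l : List Char) : (pvRep2 l).length ≤ l.length := by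
  induction l using pvRep2.induct with
  | case1 => simp [pvRep2]
  | case2 c => simp [pvRep2]
  | case3 a b t hab ih => simp [pvRep2, hab]; omega
  | case4 a b t hab ih =>
    simp only [pvRep2, if_neg hab]
    simpa using ih

theorem pvRep2_len_lt (l : List Char) (h : [' ', ' '] <:+: l) :
    (pvRep2 l).length < l.length := by
  induction l using pvRep2.induct with
  | case1 => exact absurd h.length_le (by simp)
  | case2 c => exact absurd h.length_le (by simp)
  | case3 a b t hab ih =>
    have := pvRep2_len_le t
    simp only [pvRep2, if_pos hab]
    simp; omega
  | case4 a b t hab ih =>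
    have h' : [' ', ' '] <:+: b :: t := by
      rcases List.infix_cons_iff.mp h with hp | hi
      · exfalso
        rcases hp with ⟨r, hr⟩
        injection hr with h1 h2
        injection h2 with h3 h4
        exact hab ⟨h1.symm, h3.symm⟩
      · exact hi
    simp only [pvRep2, if_neg hab]
    simpa using ih h'

theorem pvCollapse_dec (t : String) (h : PySem.Str.isIn "  " t = true) :
    (PySem.Str.replace t "  " " ").toList.length < t.toList.length := by
  have hinf : ("  " : String).toList <:+: t.toList := (PySem.Str.isIn_iff_infix _ _).mp h
  have h2 : ("  " : String).toList = [' ', ' '] := by decide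
  have h1 : (" " : String).toList = [' '] := by decide
  rw [PySem.Str.toList_replace, h2, h1, pvReplace_dbl]
  exact pvRep2_len_lt _ (h2 ▸ hinf)

-- A's `while "  " in s: s = s.replace("  ", " ")`
def pvCollapse (t : String) : String :=
  if h : PySem.Str.isIn "  " t = true then pvCollapse (PySem.Str.replace t "  " " ") else t
termination_by t.toList.length
decreasing_by exact pvCollapse_dec t h

def reformat_name (s : String) (chars : List String) : String :=
  let t1 := PySem.Str.stripChars s " "
  let t2 := chars.foldl (fun acc c => PySem.Str.replace acc c "") t1
  let t3 := pvCollapse t2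
  PySem.Str.replace t3 " " "_"

-- ===== PORT B =====
-- one pass with a pending-space flag: skip chars is done by the same replace loop (order matters
-- for multi-character entries of `chars`), then a single scan collapses space runs to '_'
def pvStep (st : List Char × Bool) (c : Char) : List Char × Bool :=
  if c = ' ' then (st.1, true)
  else if st.2 then (st.1 ++ ['_'] ++ [c], false)
  else (st.1 ++ [c], false)

def reformat_name_alt (s : String) (chars : List String) : String :=
  let t1 := PySem.Str.stripChars s " "
  let t2 := chars.foldl (fun acc c => PySem.Str.replace acc c "") t1
  let r := t2.toList.foldl pvStep ([], false)
  String.ofList (if r.2 then r.1 ++ ['_'] else r.1)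

-- ===== PRECONDITION & SPEC =====
def Spec_reformat_name (s : String) (chars : List String) (out : String) : Prop := out = reformat_name_alt s chars
instance (s : String) (chars : List String) (out : String) : Decidable (Spec_reformat_name s chars out) := by unfold Spec_reformat_name; infer_instance

-- ===== CLAIM (what is proved, stated in full; the proofs are below) =====
def Claim_equal_reformat_name : Prop := ∀ (s : String) (chars : List String), Dom_reformat_name s chars → Spec_reformat_name s chars (reformat_name s chars)

-- ===== LEMMAS AND PROOFS =====
-- spec of the space-collapsing tail shared by both ports: runs of spaces become one '_'
def pvG : List Char → List Char
  | [] => []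
  | c :: t => if c = ' ' then '_' :: pvG (t.dropWhile (· == ' ')) else c :: pvG t
termination_by l => l.length
decreasing_by
  · exact Nat.lt_succ_of_le (List.length_dropWhile_le _ _)
  · simp

def pvMapU (l : List Char) : List Char := l.map (fun c => if c = ' ' then '_' else c)

theorem pvG_nil : pvG [] = [] := by rw [pvG]

theorem pvG_cons_space (t : List Char) :
    pvG (' ' :: t) = '_' :: pvG (t.dropWhile (· == ' ')) := by rw [pvG]; simp

theorem pvG_cons_of_ne (c : Char) (t : List Char) (hc : c ≠ ' ') :
    pvG (c :: t) = c :: pvG t := by rw [pvG]; simp [hc]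

theorem pvG_space_space (t : List Char) : pvG (' ' :: ' ' :: t) = pvG (' ' :: t) := by
  rw [pvG_cons_space, pvG_cons_space]
  simp [List.dropWhile]

theorem pvGo1 : ∀ (fuel : Nat) (l acc : List Char), l.length ≤ fuel →
    PySem.Chars.replace.go [' '] ['_'] fuel l acc = acc.reverse ++ pvMapU l := by
  intro fuel
  induction fuel with
  | zero =>
    intro l acc h
    have : l = [] := List.length_eq_zero_iff.mp (Nat.le_zero.mp h)
    subst this
    simp [PySem.Chars.replace.go, pvMapU]
  | succ n ih =>
    intro l acc h
    match l with
    | [] => simp [PySem.Chars.replace.go, pvMapU]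
    | c :: t =>
      have hlen : t.length ≤ n := by simp at h; omega
      by_cases hc : c = ' '
      · subst hc
        simp [PySem.Chars.replace.go, List.isPrefixOf, ih t ('_' :: acc) hlen, pvMapU]
      · have hpre : [' '].isPrefixOf (c :: t) = false := by
          simp [List.isPrefixOf]
          exact fun hx => hc hx.symm
        simp [PySem.Chars.replace.go, hpre, ih t (c :: acc) hlen, pvMapU, hc]

theorem pvReplace_sp (l : List Char) :
    PySem.Chars.replace l [' '] ['_'] = pvMapU l := by
  have := pvGo1 l.length l [] le_rfl
  simpa [PySem.Chars.replace] using this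

theorem pvMapU_eq_pvG (l : List Char) (h : ¬ [' ', ' '] <:+: l) : pvMapU l = pvG l := by
  induction l with
  | nil => simp [pvMapU, pvG_nil]
  | cons c t ih =>
    have ht : ¬ [' ', ' '] <:+: t := fun h' => h (h'.trans (List.suffix_cons c t).isInfix)
    by_cases hc : c = ' '
    · subst hc
      match t with
      | [] => simp [pvMapU, pvG_cons_space, pvG_nil]
      | d :: u =>
        have hd : d ≠ ' ' := by
          intro hd; subst hd
          exact h ⟨[], u, rfl⟩
        rw [pvG_cons_space]
        simp only [List.dropWhile_cons, beq_iff_eq, if_neg hd]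
        rw [← ih ht]
        simp [pvMapU]
    · rw [pvG_cons_of_ne c t hc, ← ih ht]
      simp [pvMapU, hc]

theorem pvG_rep2_aux : ∀ (n : Nat) (l : List Char), l.length ≤ n →
    pvG (pvRep2 l) = pvG l ∧ pvG (' ' :: pvRep2 l) = pvG (' ' :: l) := by
  intro n
  induction n with
  | zero =>
    intro l h
    have : l = [] := List.length_eq_zero_iff.mp (Nat.le_zero.mp h)
    subst this; exact ⟨rfl, rfl⟩
  | succ n ih =>
    intro l h
    match l with
    | [] => exact ⟨rfl, rfl⟩
    | [c] => exact ⟨rfl, rfl⟩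
    | a :: b :: t =>
      have hbt : (b :: t).length ≤ n := by simp at h ⊢; omega
      have ht : t.length ≤ n := by simp at h ⊢; omega
      by_cases hab : a = ' ' ∧ b = ' '
      · obtain ⟨ha, hb⟩ := hab
        subst ha; subst hb
        rw [show pvRep2 (' ' :: ' ' :: t) = ' ' :: pvRep2 t from by simp [pvRep2]]
        constructor
        · rw [(ih t ht).2, pvG_space_space]
        · rw [pvG_space_space, (ih t ht).2, pvG_space_space, pvG_space_space]
      · simp only [pvRep2, if_neg hab]
        by_cases ha : a = ' '
        · subst ha
          have hb : b ≠ ' ' := fun hb => hab ⟨rfl, hb⟩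
          constructor
          · rw [(ih (b :: t) hbt).2]
          · rw [pvG_space_space, (ih (b :: t) hbt).2, pvG_space_space]
        · constructor
          · rw [pvG_cons_of_ne a _ ha, pvG_cons_of_ne a _ ha, (ih (b :: t) hbt).1]
          · rw [pvG_cons_space, pvG_cons_space]
            simp only [List.dropWhile_cons, beq_iff_eq, if_neg ha]
            rw [pvG_cons_of_ne a _ ha, pvG_cons_of_ne a _ ha, (ih (b :: t) hbt).1]

theorem pvCollapse_g_aux : ∀ (n : Nat) (t : String), t.toList.length ≤ n →
    pvMapU (pvCollapse t).toList = pvG t.toList := by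
  intro n
  induction n with
  | zero =>
    intro t ht
    rw [pvCollapse]
    split
    · rename_i h
      have := pvCollapse_dec t h
      omega
    · rename_i h
      apply pvMapU_eq_pvG
      intro hinf
      exact h ((PySem.Str.isIn_iff_infix _ _).mpr (by simpa using hinf))
  | succ n ih =>
    intro t ht
    rw [pvCollapse]
    split
    · rename_i h
      have hdec := pvCollapse_dec t h
      rw [ih _ (by omega)]
      rw [PySem.Str.toList_replace]
      have h2 : ("  " : String).toList = [' ', ' '] := by decide
      have h1 : (" " : String).toList = [' '] := by decide
      rw [h2, h1, pvReplace_dbl]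
      exact (pvG_rep2_aux t.toList.length t.toList le_rfl).1
    · rename_i h
      apply pvMapU_eq_pvG
      intro hinf
      exact h ((PySem.Str.isIn_iff_infix _ _).mpr (by simpa using hinf))

theorem pvFold (l : List Char) (out : List Char) (b : Bool) :
    (if (l.foldl pvStep (out, b)).2 then (l.foldl pvStep (out, b)).1 ++ ['_']
     else (l.foldl pvStep (out, b)).1) = out ++ pvG (if b then ' ' :: l else l) := by
  induction l generalizing out b with
  | nil =>
    cases b
    · simp [pvG_nil]
    · simp [pvG_cons_space, pvG_nil]
  | cons c t ih =>
    by_cases hc : c = ' '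
    · subst hc
      have hstep : pvStep (out, b) ' ' = (out, true) := by simp [pvStep]
      rw [List.foldl_cons, hstep, ih out true]
      cases b
      · simp
      · simp [pvG_space_space]
    · cases b
      · have hstep : pvStep (out, false) c = (out ++ [c], false) := by simp [pvStep, hc]
        rw [List.foldl_cons, hstep, ih (out ++ [c]) false]
        simp [pvG_cons_of_ne c t hc]
      · have hstep : pvStep (out, true) c = (out ++ ['_'] ++ [c], false) := by
          simp [pvStep, hc]
        rw [List.foldl_cons, hstep, ih (out ++ ['_'] ++ [c]) false]
        rw [if_neg (by simp), if_pos rfl, pvG_cons_space]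
        simp only [List.dropWhile_cons, beq_iff_eq, if_neg hc]
        rw [pvG_cons_of_ne c t hc]
        simp

-- ===== VERDICT (by name: the statement is the Claim_ definition above) =====
theorem reformat_name_spec : Claim_equal_reformat_name := by
  intro s chars _
  unfold Spec_reformat_name reformat_name reformat_name_alt
  rw [← String.toList_inj]
  simp only [String.toList_ofList, PySem.Str.toList_replace]
  have h1 : (" " : String).toList = [' '] := by decide
  have h3 : ("_" : String).toList = ['_'] := by decide
  rw [h1, h3, pvReplace_sp]
  rw [pvCollapse_g_aux _ _ le_rfl]
  rw [pvFold _ [] false]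
  simp
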